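-- pv_equiv track=rewrite | github.com/sisiliasinaga/cs337_proj2 | parser.py | getMethods
-- ===== SOURCE A (Python) =====
-- import string
--
-- def getMethods(directions):
--     table = str.maketrans(dict.fromkeys(string.punctuation))
--     possibleMethods = ['bake', 'heat', 'cook', 'boil', 'saute', 'broil', 'poach', 'roast', 'steam']
--
--     resultList = []
--     for i in range(len(directions)):
--         directionCleaned = directions[i].translate(table).lower()
--         for word in directionCleaned.split():
--             if word in possibleMethods:
--                 if word not in resultList:
--                     resultList.append(word)
--
--     return resultList
-- ===== SOURCE B (Python) =====
-- import string
--
-- def getMethods(directions):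
--     table = str.maketrans(dict.fromkeys(string.punctuation))
--     possibleMethods = ['bake', 'heat', 'cook', 'boil', 'saute', 'broil', 'poach', 'roast', 'steam']
--     matches = [w for d in directions
--                  for w in d.translate(table).lower().split()
--                  if w in possibleMethods]
--     # order the methods that occur by the position of their first occurrence
--     return sorted((m for m in possibleMethods if m in matches), key=matches.index)
-- ===== Notes on version B (the rewrite author's own statement) =====
-- stated objective: alternative
-- what changed: Replaces A's inline left-to-right dedup (append when the word is not yet in the result) by a different algorithm: collect all matched words in one flat pass, then take the methods that occur and sort them by the index of their first occurrence in that match stream.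
import Mathlib
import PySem

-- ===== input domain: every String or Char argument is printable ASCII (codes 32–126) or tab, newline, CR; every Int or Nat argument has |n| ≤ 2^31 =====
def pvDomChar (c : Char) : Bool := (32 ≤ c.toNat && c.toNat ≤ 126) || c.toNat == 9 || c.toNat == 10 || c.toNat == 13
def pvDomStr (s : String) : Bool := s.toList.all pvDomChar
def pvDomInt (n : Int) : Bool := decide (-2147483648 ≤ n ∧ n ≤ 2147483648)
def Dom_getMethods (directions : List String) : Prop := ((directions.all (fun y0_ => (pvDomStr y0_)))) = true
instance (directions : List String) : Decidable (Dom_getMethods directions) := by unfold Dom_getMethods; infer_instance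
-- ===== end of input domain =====

-- B collects all matched method words in one flat pass, then orders the occurring methods by the index
-- of their first occurrence (sort by matches.index) instead of A's inline 'not yet in result' dedup
-- (objective: alternative algorithm, same cost).

-- ===== PORT A =====
-- s.translate(table) with a delete-table for string.punctuation = drop exactly those chars (exact: code-point table)
def pvPunct : List Char := "!\"#$%&'()*+,-./:;<=>?@[\\]^_`{|}~".toList

def pvClean (s : String) : String :=
  String.ofList ((s.toList.filter (fun c => !(pvPunct.contains c))))

def pvPossibleMethods : List String :=
  ["bake", "heat", "cook", "boil", "saute", "broil", "poach", "roast", "steam"]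

def getMethods (directions : List String) : List String :=
  directions.foldl (fun resultList d =>
    let directionCleaned := PySem.Str.lower (pvClean d)
    (PySem.Str.split₀ directionCleaned).foldl (fun acc word =>
      if word ∈ pvPossibleMethods then
        (if word ∈ acc then acc else acc ++ [word])
      else acc) resultList) []

-- ===== PORT B =====
-- matches.index m is always defined here (m ∈ matches); ported totally via index?.getD 0
def getMethods_alt (directions : List String) : List String :=
  let ms := directions.flatMap (fun d =>
    (PySem.Str.split₀ (PySem.Str.lower (pvClean d))).filter
      (fun w => decide (w ∈ pvPossibleMethods)))
  PySem.List.sorted (pvPossibleMethods.filter (fun m => decide (m ∈ ms)))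
    (fun m => (PySem.List.index? ms m).getD 0)

-- ===== PRECONDITION & SPEC =====
def Spec_getMethods (directions : List String) (out : List String) : Prop := out = getMethods_alt directions
instance (directions : List String) (out : List String) : Decidable (Spec_getMethods directions out) := by unfold Spec_getMethods; infer_instance

-- ===== CLAIM (what is proved, stated in full; the proofs are below) =====
def Claim_equal_getMethods : Prop := ∀ (directions : List String), Dom_getMethods directions → Spec_getMethods directions (getMethods directions)

-- ===== LEMMAS AND PROOFS =====

-- A's inline 'if word not in resultList: append' step is exactly PySem.Set.add
theorem pvStep_eq_add (acc : List String) (w : String) :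
    (if w ∈ acc then acc else acc ++ [w]) = PySem.Set.add acc w := by
  simp [PySem.Set.add]

-- folding an inner fold over each block = one fold over the flattened blocks
theorem pvFoldl_flatMap {α β γ : Type} (g : α → List β) (f : γ → β → γ) :
    ∀ (L : List α) (acc : γ),
      L.foldl (fun a d => (g d).foldl f a) acc = (L.flatMap g).foldl f acc := by
  intro L
  induction L with
  | nil => intro acc; simp
  | cons d t ih => intro acc; simp [List.flatMap_cons, List.foldl_append, ih]

-- A's whole computation is the ordered dedup of the flat match stream
theorem pvA_eq_dedup (directions : List String) :
    getMethods directions =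
      PySem.List.dedup (directions.flatMap (fun d =>
        (PySem.Str.split₀ (PySem.Str.lower (pvClean d))).filter
          (fun w => decide (w ∈ pvPossibleMethods)))) := by
  unfold getMethods
  simp only [PySem.List.dedup_eq_ofList, PySem.Set.ofList, PySem.Set.empty]
  rw [← pvFoldl_flatMap]
  apply PySem.List.foldl_congr_mem
  intro acc d hd
  rw [PySem.List.foldl_ite_eq_foldl_filter]
  exact PySem.List.foldl_congr_mem _ _ _ _ (fun a w _ => pvStep_eq_add a w)

-- first-occurrence index of a member is below the length
theorem pvIdx_lt_length {L : List String} {a : String} (ha : a ∈ L) :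
    (PySem.List.index? L a).getD 0 < L.length := by
  obtain ⟨k, hk⟩ := Option.isSome_iff_exists.mp ((PySem.List.index?_isSome_iff L a).mpr ha)
  obtain ⟨hlt, -, -⟩ := PySem.List.getElem_of_index?_eq_some hk
  rw [hk]
  simpa using hlt

-- the ordered dedup is strictly increasing under the first-occurrence index
theorem pvDedup_pairwise (L : List String) :
    (PySem.List.dedup L).Pairwise
      (fun a b => (PySem.List.index? L a).getD 0 < (PySem.List.index? L b).getD 0) := by
  induction L using List.reverseRecOn with
  | nil => simp [PySem.List.dedup, PySem.Set.ofList, PySem.Set.empty]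
  | append_singleton L x ih =>
    have hded : PySem.List.dedup (L ++ [x]) =
        if x ∈ PySem.List.dedup L then PySem.List.dedup L else PySem.List.dedup L ++ [x] := by
      simp only [PySem.List.dedup, PySem.Set.ofList, List.foldl_append, List.foldl_cons,
        List.foldl_nil, PySem.Set.add]
      split_ifs with h1 h2 h3 <;> simp_all
    have hmem : ∀ a : String, a ∈ PySem.List.dedup L ↔ a ∈ L := fun a => PySem.List.mem_dedup L a
    have hidx : ∀ a : String, a ∈ L → PySem.List.index? (L ++ [x]) a = PySem.List.index? L a :=
      fun a ha => PySem.List.index?_append_of_mem [x] ha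
    rw [hded]
    split_ifs with hx
    · refine ih.imp_of_mem ?_
      intro a b ha hb h
      rwa [hidx a ((hmem a).mp ha), hidx b ((hmem b).mp hb)]
    · have hxL : x ∉ L := fun h => hx ((hmem x).mpr h)
      rw [List.pairwise_append]
      refine ⟨ih.imp_of_mem ?_, by simp, ?_⟩
      · intro a b ha hb h
        rwa [hidx a ((hmem a).mp ha), hidx b ((hmem b).mp hb)]
      · intro a ha b hb
        have haL : a ∈ L := (hmem a).mp ha
        have hb' : b = x := by simpa using hb
        subst hb'
        rw [hidx a haL, PySem.List.index?_append_singleton_self L _ hxL]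
        simpa using pvIdx_lt_length haL
-- the filtered method list is a permutation of the ordered dedup of the match stream
theorem pvPerm (L : List String) (hL : ∀ w ∈ L, w ∈ pvPossibleMethods) :
    (PySem.List.dedup L).Perm (pvPossibleMethods.filter (fun m => decide (m ∈ L))) := by
  rw [List.perm_ext_iff_of_nodup (PySem.List.nodup_dedup L)
    (List.Nodup.filter _ (by decide))]
  intro a
  simp only [PySem.List.mem_dedup, List.mem_filter, decide_eq_true_eq]
  exact ⟨fun h => ⟨hL a h, h⟩, fun h => h.2⟩

theorem getMethods_eq (directions : List String) :
    getMethods directions = getMethods_alt directions := by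
  rw [pvA_eq_dedup]
  unfold getMethods_alt
  set L := directions.flatMap (fun d =>
    (PySem.Str.split₀ (PySem.Str.lower (pvClean d))).filter
      (fun w => decide (w ∈ pvPossibleMethods))) with hLdef
  have hL : ∀ w ∈ L, w ∈ pvPossibleMethods := by
    intro w hw
    rw [hLdef] at hw
    simp only [List.mem_flatMap, List.mem_filter, decide_eq_true_eq] at hw
    obtain ⟨d, -, -, h⟩ := hw
    exact h
  exact (PySem.List.sorted_eq_of_perm_of_pairwise_lt _ _ _ (pvPerm L hL) (pvDedup_pairwise L)).symm

-- ===== VERDICT (by name: the statement is the Claim_ definition above) =====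
theorem getMethods_spec : Claim_equal_getMethods := by
  intro directions _
  exact getMethods_eq directions
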